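-- pv_equiv track=rewrite | github.com/aghaffar101/synonyms | synonyms.py | build_semantic_descriptors
-- ===== SOURCE A (Python) =====
-- def build_semantic_descriptors(sentences):
--     #need to create a dictionary for every word, which includes the other words
--     #that appeared in that sentence. Must do this without having a complexity
--     #of O(n^2) where n is the number of words in the file.
--     semantic_d = {}
--     for sentence in sentences:
--         #get rid of duplicates
--         word_set = set(sentence)
--         l_words = list(word_set)
--         for word in word_set:
--             if word not in semantic_d.keys():
--                 semantic_d[word] = {}
--             for i in range(len(l_words)):
--                 if l_words[i] == word:
--                     continue
--                 semantic_d[word][l_words[i]] = semantic_d[word].get(l_words[i],0) + 1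
--
--     return semantic_d
-- ===== SOURCE B (Python) =====
-- def build_semantic_descriptors(sentences):
--     # Pair-based build: first give every distinct word its entry, then visit
--     # each unordered pair of distinct words once, updating both directions.
--     semantic_d = {}
--     for sentence in sentences:
--         rest = list(set(sentence))
--         for w in rest:
--             semantic_d.setdefault(w, {})
--         while rest:
--             a, rest = rest[0], rest[1:]
--             for b in rest:
--                 semantic_d[a][b] = semantic_d[a].get(b, 0) + 1
--                 semantic_d[b][a] = semantic_d[b].get(a, 0) + 1
--     return semantic_d
-- ===== Notes on version B (the rewrite author's own statement) =====
-- stated objective: alternative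
-- what changed: Replaces A's per-word full scan of the sentence (with a skip-self check and a membership test against all keys) by a setdefault pass plus a triangular enumeration that visits each unordered pair of distinct words exactly once and increments both directions symmetrically.
import Mathlib
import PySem

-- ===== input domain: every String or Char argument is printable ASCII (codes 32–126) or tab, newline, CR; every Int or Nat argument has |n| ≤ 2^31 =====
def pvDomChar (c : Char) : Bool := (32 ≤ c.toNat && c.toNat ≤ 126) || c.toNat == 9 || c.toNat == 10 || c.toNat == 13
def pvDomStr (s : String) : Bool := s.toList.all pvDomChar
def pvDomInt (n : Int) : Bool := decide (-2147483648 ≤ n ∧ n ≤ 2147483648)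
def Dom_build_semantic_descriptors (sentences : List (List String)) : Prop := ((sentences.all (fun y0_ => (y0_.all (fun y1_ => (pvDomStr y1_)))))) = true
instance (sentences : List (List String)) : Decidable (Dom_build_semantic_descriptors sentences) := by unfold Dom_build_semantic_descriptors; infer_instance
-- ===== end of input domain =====

-- B replaces A's per-word full scan by a setdefault pass plus a triangular pair
-- enumeration updating both directions of each unordered pair once (alternative
-- decomposition, same asymptotic cost).

abbrev pvInner := PySem.Dict String Int
abbrev pvOuter := PySem.Dict String pvInner

-- shared primitive: the Python statement  d[a][b] = d[a].get(b, 0) + 1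
def pvUpd (d : pvOuter) (a b : String) : pvOuter :=
  d.insert a ((d.getD a PySem.Dict.empty).insert b ((d.getD a PySem.Dict.empty).getD b 0 + 1))

-- ===== PORT A =====
-- 'if word not in semantic_d.keys(): semantic_d[word] = {}'
def pvTouch (d : pvOuter) (w : String) : pvOuter :=
  if d.contains w then d else d.insert w PySem.Dict.empty

-- the inner 'for i in range(len(l_words))' loop with the skip-self check
def pvInnerA (ws : List String) (word : String) (d : pvOuter) : pvOuter :=
  ws.foldl (fun d w => if w == word then d else pvUpd d word w) d

-- one iteration of 'for sentence in sentences'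
def pvStepA (d : pvOuter) (sentence : List String) : pvOuter :=
  let l_words := PySem.Set.ofList sentence
  l_words.foldl (fun d word => pvInnerA l_words word (pvTouch d word)) d

def build_semantic_descriptors (sentences : List (List String)) : List (String × List (String × Int)) :=
  ((sentences.foldl pvStepA PySem.Dict.empty).items.map (fun p => (p.1, p.2.items)))

-- ===== PORT B =====
-- 'for b in rest: d[a][b] += 1; d[b][a] += 1'
def pvPairInner (a : String) (rest : List String) (d : pvOuter) : pvOuter :=
  rest.foldl (fun d b => pvUpd (pvUpd d a b) b a) d

-- 'while rest: a, rest = rest[0], rest[1:]; …'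
def pvPairs (d : pvOuter) : List String → pvOuter
  | [] => d
  | a :: rest => pvPairs (pvPairInner a rest d) rest

def pvStepB (d : pvOuter) (sentence : List String) : pvOuter :=
  let rest := PySem.Set.ofList sentence
  pvPairs (rest.foldl (fun d w => d.setdefault w PySem.Dict.empty) d) rest

def build_semantic_descriptors_alt (sentences : List (List String)) : List (String × List (String × Int)) :=
  ((sentences.foldl pvStepB PySem.Dict.empty).items.map (fun p => (p.1, p.2.items)))

-- ===== PRECONDITION & SPEC =====
def Spec_build_semantic_descriptors (sentences : List (List String)) (out : List (String × List (String × Int))) : Prop := out = build_semantic_descriptors_alt sentences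
instance (sentences : List (List String)) (out : List (String × List (String × Int))) : Decidable (Spec_build_semantic_descriptors sentences out) := by unfold Spec_build_semantic_descriptors; infer_instance

-- ===== CLAIM (what is proved, stated in full; the proofs are below) =====
def Claim_equal_build_semantic_descriptors : Prop := ∀ (sentences : List (List String)), Dom_build_semantic_descriptors sentences → Spec_build_semantic_descriptors sentences (build_semantic_descriptors sentences)

-- ===== LEMMAS AND PROOFS =====

-- 'multi-modify' normal form: bump every key k of d by the argument list f k
def pvBump (v : pvInner) (b : String) : pvInner := v.insert b (v.getD b 0 + 1)
def pvBumps (v : pvInner) (us : List String) : pvInner := us.foldl pvBump v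
def pvMM (d : pvOuter) (f : String → List String) : pvOuter :=
  PySem.Dict.mk (d.items.map (fun p => (p.1, pvBumps p.2 (f p.1))))

lemma pvMM_items (d : pvOuter) (f : String → List String) :
    (pvMM d f).items = d.items.map (fun p => (p.1, pvBumps p.2 (f p.1))) := rfl

lemma pvMM_keys (d : pvOuter) (f : String → List String) : (pvMM d f).keys = d.keys := by
  simp [PySem.Dict.keys, pvMM_items]

lemma pvMM_contains (d : pvOuter) (f : String → List String) (k : String) :
    (pvMM d f).contains k = d.contains k := by
  simp only [PySem.Dict.contains, pvMM_items, List.any_map]; rfl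

lemma pvMM_nil (d : pvOuter) : pvMM d (fun _ => []) = d := by
  apply PySem.Dict.ext; simp [pvMM_items, pvBumps]

lemma pvMM_getD (d : pvOuter) (f : String → List String) {a : String}
    (hnd : d.keys.Nodup) (h : a ∈ d.keys) :
    (pvMM d f).getD a PySem.Dict.empty = pvBumps (d.getD a PySem.Dict.empty) (f a) := by
  simp only [PySem.Dict.keys, List.mem_map] at h
  obtain ⟨⟨a', v⟩, hp, h1⟩ := h
  dsimp only at h1; subst h1
  have h2 := PySem.Dict.getD_of_mem_items d hp hnd PySem.Dict.empty
  have h3 : (a', pvBumps v (f a')) ∈ (pvMM d f).items := by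
    rw [pvMM_items]; exact List.mem_map.mpr ⟨(a', v), hp, rfl⟩
  have h4 : (pvMM d f).keys.Nodup := by rw [pvMM_keys]; exact hnd
  rw [PySem.Dict.getD_of_mem_items _ h3 h4, h2]

lemma pvUpd_pvMM (d : pvOuter) (f : String → List String) {a : String} (b : String)
    (hnd : d.keys.Nodup) (h : a ∈ d.keys) :
    pvUpd (pvMM d f) a b = pvMM d (fun k => if k = a then f k ++ [b] else f k) := by
  have hc : (pvMM d f).contains a = true := by
    rw [pvMM_contains]; exact (PySem.Dict.contains_iff_mem_keys d a).mpr h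
  have hg := pvMM_getD d f hnd h
  apply PySem.Dict.ext
  show (pvUpd (pvMM d f) a b).items = _
  unfold pvUpd
  rw [PySem.Dict.items_insert_of_contains _ _ hc, hg]
  rw [pvMM_items, pvMM_items, List.map_map]
  apply List.map_congr_left
  rintro ⟨k, v⟩ hp
  by_cases hka : k = a
  · subst hka
    have h2 := PySem.Dict.getD_of_mem_items d hp hnd PySem.Dict.empty
    simp [Function.comp, h2, pvBumps, pvBump]
  · simp [Function.comp, hka]

lemma pvTouch_pvMM (d : pvOuter) (f : String → List String) {w : String} (hf : f w = []) :
    pvTouch (pvMM d f) w = pvMM (pvTouch d w) f := by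
  by_cases hc : d.contains w = true
  · simp [pvTouch, pvMM_contains, hc]
  · have hc' : d.contains w = false := by simpa using hc
    apply PySem.Dict.ext
    simp only [pvTouch, pvMM_contains, hc', Bool.false_eq_true, if_false]
    rw [PySem.Dict.items_insert_of_not_contains _ _ (by rw [pvMM_contains]; exact hc')]
    rw [pvMM_items, pvMM_items, PySem.Dict.items_insert_of_not_contains _ _ hc']
    simp [hf, pvBumps]

lemma pvTouch_nodup {d : pvOuter} (hnd : d.keys.Nodup) (w : String) :
    (pvTouch d w).keys.Nodup := by
  by_cases hc : d.contains w = true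
  · simpa [pvTouch, hc] using hnd
  · unfold pvTouch
    rw [if_neg hc]
    exact PySem.Dict.nodup_keys_insert d w PySem.Dict.empty hnd

lemma pvTouch_mem {d : pvOuter} {k : String} (w : String) (h : k ∈ d.keys ∨ k = w) :
    k ∈ (pvTouch d w).keys := by
  by_cases hc : d.contains w = true
  · have hw : w ∈ d.keys := (PySem.Dict.contains_iff_mem_keys d w).mp hc
    unfold pvTouch
    rw [if_pos hc]
    rcases h with h | rfl
    · exact h
    · exact hw
  · unfold pvTouch
    rw [if_neg hc, PySem.Dict.mem_keys_insert]
    tauto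

lemma pvTouchfold_nodup : ∀ (l : List String) (d : pvOuter), d.keys.Nodup →
    (l.foldl pvTouch d).keys.Nodup := by
  intro l
  induction l with
  | nil => intro d hnd; exact hnd
  | cons w t ih => intro d hnd; exact ih (pvTouch d w) (pvTouch_nodup hnd w)

lemma pvTouchfold_mem : ∀ (l : List String) (d : pvOuter) (k : String),
    (k ∈ d.keys ∨ k ∈ l) → k ∈ (l.foldl pvTouch d).keys := by
  intro l
  induction l with
  | nil =>
    intro d k h
    rcases h with h | h
    · exact h
    · simp at h
  | cons w t ih =>
    intro d k h
    apply ih (pvTouch d w) k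
    rcases h with h | h
    · exact Or.inl (pvTouch_mem w (Or.inl h))
    · rcases List.mem_cons.mp h with h | h
      · exact Or.inl (pvTouch_mem w (Or.inr h))
      · exact Or.inr h

lemma pvUpdsKey_pvMM (d : pvOuter) {a : String} (hnd : d.keys.Nodup) (h : a ∈ d.keys) :
    ∀ (us : List String) (f : String → List String),
    us.foldl (fun d u => pvUpd d a u) (pvMM d f) = pvMM d (fun k => if k = a then f k ++ us else f k) := by
  intro us
  induction us with
  | nil =>
    intro f
    simp only [List.foldl_nil]
    congr 1; funext k
    by_cases hk : k = a <;> simp [hk]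
  | cons u t ih =>
    intro f
    simp only [List.foldl_cons]
    rw [pvUpd_pvMM d f u hnd h, ih]
    congr 1; funext k
    by_cases hk : k = a <;> simp [hk]

lemma pvInnerA_pvMM (ws : List String) (d : pvOuter) (f : String → List String) {word : String}
    (hnd : d.keys.Nodup) (h : word ∈ d.keys) :
    pvInnerA ws word (pvMM d f) =
      pvMM d (fun k => if k = word then f k ++ ws.filter (fun w => !(w == word)) else f k) := by
  unfold pvInnerA
  have hff : (ws.filter (fun w => !(w == word))).foldl (fun d u => pvUpd d word u) (pvMM d f)
      = ws.foldl (fun d w => if w == word then d else pvUpd d word w) (pvMM d f) := by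
    rw [List.foldl_filter]
    congr 1
    funext d' w
    by_cases hw : w = word <;> simp [hw]
  rw [← hff, pvUpdsKey_pvMM d hnd h]

lemma pvA_red (ws : List String) : ∀ (out : List String) (d : pvOuter) (f : String → List String),
    d.keys.Nodup → out.Nodup → (∀ u ∈ out, f u = []) →
    out.foldl (fun d word => pvInnerA ws word (pvTouch d word)) (pvMM d f) =
      pvMM (out.foldl pvTouch d)
        (fun k => f k ++ (if k ∈ out then ws.filter (fun w => !(w == k)) else [])) := by
  intro out
  induction out with
  | nil =>
    intro d f hnd hon hfl
    simp only [List.foldl_nil]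
    congr 1; funext k; simp
  | cons w t ih =>
    intro d f hnd hon hfl
    have hfw : f w = [] := hfl w (List.mem_cons_self)
    have hwt : w ∉ t := (List.nodup_cons.mp hon).1
    have htn : t.Nodup := (List.nodup_cons.mp hon).2
    simp only [List.foldl_cons]
    rw [pvTouch_pvMM d f hfw]
    have hnd' := pvTouch_nodup hnd w
    have hw : w ∈ (pvTouch d w).keys := pvTouch_mem w (Or.inr rfl)
    rw [pvInnerA_pvMM ws (pvTouch d w) f hnd' hw]
    rw [ih (pvTouch d w) _ hnd' htn (fun u hu => by
      have : u ≠ w := fun e => hwt (e ▸ hu)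
      simp [this, hfl u (List.mem_cons_of_mem w hu)])]
    congr 1; funext k
    by_cases hk : k = w
    · subst hk; simp [hwt]
    · simp [hk, List.mem_cons]

lemma pvPairInner_pvMM {a : String} : ∀ (l : List String) (d : pvOuter) (f : String → List String),
    d.keys.Nodup → (a ∈ d.keys) → (∀ b ∈ l, b ∈ d.keys) → a ∉ l → l.Nodup →
    pvPairInner a l (pvMM d f) =
      pvMM d (fun k => f k ++ (if k = a then l else if k ∈ l then [a] else [])) := by
  intro l
  induction l with
  | nil =>
    intro d f hnd ha _ _ _
    unfold pvPairInner
    simp only [List.foldl_nil]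
    congr 1; funext k
    by_cases hk : k = a <;> simp [hk]
  | cons b t ih =>
    intro d f hnd ha hbm hal hln
    have hab : a ≠ b := fun e => hal (e ▸ List.mem_cons_self)
    have hat : a ∉ t := fun e => hal (List.mem_cons_of_mem b e)
    have hbt : b ∉ t := (List.nodup_cons.mp hln).1
    have htn : t.Nodup := (List.nodup_cons.mp hln).2
    have hbk : b ∈ d.keys := hbm b List.mem_cons_self
    have hstep : pvPairInner a (b :: t) (pvMM d f)
        = pvPairInner a t (pvUpd (pvUpd (pvMM d f) a b) b a) := rfl
    have h1 := pvUpd_pvMM d f b hnd ha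
    have h2 := pvUpd_pvMM d (fun k => if k = a then f k ++ [b] else f k) a hnd hbk
    have h3 := ih d (fun k => if k = b then (if k = a then f k ++ [b] else f k) ++ [a]
          else (if k = a then f k ++ [b] else f k))
      hnd ha (fun x hx => hbm x (List.mem_cons_of_mem b hx)) hat htn
    rw [hstep, h1, h2, h3]
    congr 1; funext k
    by_cases hka : k = a
    · subst hka; simp [hab]
    · by_cases hkb : k = b
      · subst hkb; simp [hka, hbt]
      · by_cases hkt : k ∈ t <;> simp [hka, hkb, hkt]

lemma pvPairs_pvMM : ∀ (l : List String) (d : pvOuter) (f : String → List String),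
    d.keys.Nodup → l.Nodup → (∀ x ∈ l, x ∈ d.keys) →
    pvPairs (pvMM d f) l =
      pvMM d (fun k => f k ++ (if k ∈ l then l.filter (fun w => !(w == k)) else [])) := by
  intro l
  induction l with
  | nil =>
    intro d f hnd _ _
    unfold pvPairs
    congr 1; funext k; simp
  | cons a t ih =>
    intro d f hnd hln hmem
    have hat : a ∉ t := (List.nodup_cons.mp hln).1
    have htn : t.Nodup := (List.nodup_cons.mp hln).2
    show pvPairs (pvPairInner a t (pvMM d f)) t = _
    rw [pvPairInner_pvMM t d f hnd (hmem a List.mem_cons_self)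
      (fun x hx => hmem x (List.mem_cons_of_mem a hx)) hat htn]
    rw [ih d (fun k => f k ++ (if k = a then t else if k ∈ t then [a] else []))
      hnd htn (fun x hx => hmem x (List.mem_cons_of_mem a hx))]
    congr 1; funext k
    by_cases hka : k = a
    · subst hka
      have hfe : t.filter (fun w => !(w == k)) = t :=
        List.filter_eq_self.mpr (fun w hw => by
          have : w ≠ k := fun e => hat (e ▸ hw)
          simp [this])
      simp [hat, hfe]
    · by_cases hkt : k ∈ t
      · simp [hka, hkt, Ne.symm hka]
      · simp [hka, hkt, List.mem_cons]

lemma pvSetdefault_eq_pvTouch (d : pvOuter) (w : String) :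
    d.setdefault w PySem.Dict.empty = pvTouch d w := by
  by_cases hc : d.contains w = true
  · rw [PySem.Dict.setdefault_of_contains d _ hc]; simp [pvTouch, hc]
  · have hc' : d.contains w = false := by simpa using hc
    rw [PySem.Dict.setdefault_of_not_contains d _ hc']
    simp [pvTouch, hc']

lemma pvStep_eq {d : pvOuter} (hnd : d.keys.Nodup) (s : List String) :
    pvStepA d s = pvStepB d s := by
  unfold pvStepA pvStepB
  show (PySem.Set.ofList s).foldl (fun d word => pvInnerA (PySem.Set.ofList s) word (pvTouch d word)) d
      = pvPairs ((PySem.Set.ofList s).foldl (fun d w => d.setdefault w PySem.Dict.empty) d) (PySem.Set.ofList s)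
  have hwnd : (PySem.Set.ofList s).Nodup := PySem.Set.nodup_ofList s
  have hsd : (PySem.Set.ofList s).foldl (fun d w => d.setdefault w PySem.Dict.empty) d
      = (PySem.Set.ofList s).foldl pvTouch d := by
    congr 1; funext d' w; exact pvSetdefault_eq_pvTouch d' w
  rw [hsd]
  have hTnd : ((PySem.Set.ofList s).foldl pvTouch d).keys.Nodup := pvTouchfold_nodup _ d hnd
  have hTmem : ∀ x ∈ PySem.Set.ofList s, x ∈ ((PySem.Set.ofList s).foldl pvTouch d).keys :=
    fun x hx => pvTouchfold_mem _ d x (Or.inr hx)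
  conv_lhs => rw [← pvMM_nil d]
  conv_rhs => rw [← pvMM_nil ((PySem.Set.ofList s).foldl pvTouch d)]
  rw [pvA_red (PySem.Set.ofList s) (PySem.Set.ofList s) d (fun _ => []) hnd hwnd (fun _ _ => rfl)]
  rw [pvPairs_pvMM (PySem.Set.ofList s) _ (fun _ => []) hTnd hwnd hTmem]

lemma pvStepB_nodup {d : pvOuter} (hnd : d.keys.Nodup) (s : List String) :
    (pvStepB d s).keys.Nodup := by
  rw [← pvStep_eq hnd s]
  have hA : pvStepA d s = pvMM ((PySem.Set.ofList s).foldl pvTouch d)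
      (fun k => (fun _ : String => ([] : List String)) k ++
        (if k ∈ PySem.Set.ofList s then (PySem.Set.ofList s).filter (fun w => !(w == k)) else [])) := by
    unfold pvStepA
    show (PySem.Set.ofList s).foldl (fun d word => pvInnerA (PySem.Set.ofList s) word (pvTouch d word)) d = _
    conv_lhs => rw [← pvMM_nil d]
    exact pvA_red (PySem.Set.ofList s) (PySem.Set.ofList s) d (fun _ => []) hnd
      (PySem.Set.nodup_ofList s) (fun _ _ => rfl)
  rw [hA, pvMM_keys]
  exact pvTouchfold_nodup _ d hnd

lemma pvFold_eq : ∀ (sentences : List (List String)) (d : pvOuter), d.keys.Nodup →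
    sentences.foldl pvStepA d = sentences.foldl pvStepB d := by
  intro sentences
  induction sentences with
  | nil => intro d _; rfl
  | cons s rest ih =>
    intro d hnd
    simp only [List.foldl_cons]
    rw [pvStep_eq hnd s]
    exact ih (pvStepB d s) (pvStepB_nodup hnd s)

-- ===== VERDICT (by name: the statement is the Claim_ definition above) =====
theorem build_semantic_descriptors_spec : Claim_equal_build_semantic_descriptors := by
  intro sentences _
  unfold Spec_build_semantic_descriptors build_semantic_descriptors build_semantic_descriptors_alt
  rw [pvFold_eq sentences PySem.Dict.empty (by simp [PySem.Dict.keys, PySem.Dict.empty])]
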